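-- pv_equiv track=rewrite | github.com/krixstin/CS555 | US17.py | parentsNotMarriedToChildren
-- ===== SOURCE A (Python) =====
-- def parentsNotMarriedToChildren(fam_dict):
--     ids = []
--     cond = True
--     for fam in fam_dict.values():
--         for i in fam:
--             if i[0] == 'HUSB':
--                 ids.append(i[1])
--             if i[0] == 'CHIL':
--                 ids.append(i[1])
--             if i[0] == 'WIFE':
--                 ids.append(i[1])
--         if len(ids) != len(set(ids)):
--             cond = False;
--         ids = []
--     return cond
-- ===== SOURCE B (Python) =====
-- def parentsNotMarriedToChildren(fam_dict):
--     ok = True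
--     for fam in fam_dict.values():
--         ids = sorted(e[1] for e in fam if e[0] in ('HUSB', 'CHIL', 'WIFE'))
--         if any(x == y for x, y in zip(ids, ids[1:])):
--             ok = False
--     return ok
-- ===== Notes on version B (the rewrite author's own statement) =====
-- stated objective: alternative
-- what changed: Per family B collects the HUSB/CHIL/WIFE ids with a filtering comprehension and detects duplicates by sorting and scanning once for an adjacent equal pair, instead of A's triple-if append loop followed by a len(list) vs len(set) comparison.
import Mathlib
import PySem

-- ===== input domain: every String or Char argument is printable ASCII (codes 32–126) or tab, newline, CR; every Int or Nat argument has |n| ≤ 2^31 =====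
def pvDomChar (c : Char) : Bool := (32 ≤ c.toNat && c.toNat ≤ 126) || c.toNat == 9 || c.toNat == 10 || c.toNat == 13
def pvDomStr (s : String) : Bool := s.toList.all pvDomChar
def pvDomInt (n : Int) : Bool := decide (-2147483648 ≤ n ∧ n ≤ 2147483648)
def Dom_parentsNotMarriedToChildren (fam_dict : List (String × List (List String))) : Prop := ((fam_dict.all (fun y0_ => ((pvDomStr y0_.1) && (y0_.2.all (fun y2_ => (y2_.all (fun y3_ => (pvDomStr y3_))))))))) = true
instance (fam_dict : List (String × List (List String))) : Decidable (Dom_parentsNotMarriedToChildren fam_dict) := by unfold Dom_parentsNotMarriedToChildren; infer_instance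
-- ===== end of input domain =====

-- B replaces A's append-loop plus len(list)!=len(set) duplicate test by a filtering
-- comprehension, a sort, and one adjacent-equal scan (alternative algorithm, same result).

-- ===== PORT A =====
-- one family entry of A's inner loop: the three ifs appending i[1] for tag i[0]
-- (i[0]/i[1] are `getD` here; Pre_ guarantees the accesses Python performs are in range)
def pvStepA (ids : List String) (i : List String) : List String :=
  let ids := if i.getD 0 "" == "HUSB" then ids ++ [i.getD 1 ""] else ids
  let ids := if i.getD 0 "" == "CHIL" then ids ++ [i.getD 1 ""] else ids
  let ids := if i.getD 0 "" == "WIFE" then ids ++ [i.getD 1 ""] else ids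
  ids

def parentsNotMarriedToChildren (fam_dict : List (String × List (List String))) : Bool :=
  (fam_dict.foldl
    (fun (st : List String × Bool) fam =>
      let ids := fam.2.foldl pvStepA st.1
      let cond := if ids.length ≠ (PySem.Set.ofList ids).length then false else st.2
      (([] : List String), cond))
    (([] : List String), true)).2

-- ===== PORT B =====
-- e[0] in ('HUSB', 'CHIL', 'WIFE')
def pvIsTag (e : List String) : Bool :=
  e.getD 0 "" == "HUSB" || e.getD 0 "" == "CHIL" || e.getD 0 "" == "WIFE"

def parentsNotMarriedToChildren_alt (fam_dict : List (String × List (List String))) : Bool :=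
  fam_dict.foldl
    (fun ok fam =>
      let ids := PySem.List.sorted ((fam.2.filter pvIsTag).map (fun e => e.getD 1 "")) (fun x => x) false
      if (ids.zip (ids.drop 1)).any (fun p => p.1 == p.2) then false else ok)
    true

-- ===== PRECONDITION & SPEC =====
-- Pre_ excludes exactly the inputs on which Python A raises IndexError: an empty family
-- entry (i[0]) or a tagged entry with no id (i[1]); Python B raises on the same inputs.
def Pre_parentsNotMarriedToChildren (fam_dict : List (String × List (List String))) : Prop :=
  ∀ kv ∈ fam_dict, ∀ e ∈ kv.2,
    e ≠ [] ∧ (e.getD 0 "" ∈ (["HUSB", "CHIL", "WIFE"] : List String) → 2 ≤ e.length)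
instance (fam_dict : List (String × List (List String))) : Decidable (Pre_parentsNotMarriedToChildren fam_dict) := by unfold Pre_parentsNotMarriedToChildren; infer_instance
def pvWitness_parentsNotMarriedToChildren : (List (String × List (List String))) :=
  [("F1", [["HUSB", "a"], ["WIFE", "b"], ["CHIL", "c"], ["DATE"]])]

def Spec_parentsNotMarriedToChildren (fam_dict : List (String × List (List String))) (out : Bool) : Prop := out = parentsNotMarriedToChildren_alt fam_dict
instance (fam_dict : List (String × List (List String))) (out : Bool) : Decidable (Spec_parentsNotMarriedToChildren fam_dict out) := by unfold Spec_parentsNotMarriedToChildren; infer_instance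

-- ===== CLAIM (what is proved, stated in full; the proofs are below) =====
def Claim_equal_parentsNotMarriedToChildren : Prop := ∀ (fam_dict : List (String × List (List String))), Dom_parentsNotMarriedToChildren fam_dict → Pre_parentsNotMarriedToChildren fam_dict → Spec_parentsNotMarriedToChildren fam_dict (parentsNotMarriedToChildren fam_dict)

-- ===== LEMMAS AND PROOFS =====

-- A's inner loop builds exactly the filtered id list B comprehends.
theorem pvStepA_eq (acc : List String) (e : List String) :
    pvStepA acc e = acc ++ (if pvIsTag e then [e.getD 1 ""] else []) := by
  unfold pvStepA pvIsTag
  by_cases h1 : e.getD 0 "" = "HUSB" <;> by_cases h2 : e.getD 0 "" = "CHIL" <;>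
    by_cases h3 : e.getD 0 "" = "WIFE" <;> simp_all

theorem pvIds_eq (fam : List (List String)) : ∀ acc : List String,
    fam.foldl pvStepA acc = acc ++ (fam.filter pvIsTag).map (fun e => e.getD 1 "") := by
  induction fam with
  | nil => simp
  | cons e t ih =>
    intro acc
    simp only [List.foldl_cons, ih, pvStepA_eq]
    by_cases h : pvIsTag e <;> simp [h]

-- length of PySem.Set.ofList is strictly smaller when the list has a duplicate
theorem pvFoldlAdd_len_le (xs : List String) : ∀ s : List String,
    (xs.foldl PySem.Set.add s).length ≤ s.length + xs.length := by
  induction xs with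
  | nil => simp
  | cons x t ih =>
    intro s
    simp only [List.foldl_cons]
    refine le_trans (ih _) ?_
    by_cases h : x ∈ s <;>
      simp [PySem.Set.add, PySem.Set.contains_eq_listContains, h, List.length_append] <;> omega

theorem pvFoldlAdd_len_lt (xs : List String) : ∀ s : List String,
    (¬ xs.Nodup ∨ ∃ x ∈ xs, x ∈ s) →
    (xs.foldl PySem.Set.add s).length < s.length + xs.length := by
  induction xs with
  | nil => rintro s (h | ⟨x, hx, _⟩) <;> simp_all
  | cons x t ih =>
    intro s h
    simp only [List.foldl_cons]
    by_cases hc : x ∈ s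
    · have : PySem.Set.add s x = s := by simp [PySem.Set.add, PySem.Set.contains_eq_listContains, hc]
      rw [this]
      have := pvFoldlAdd_len_le t s
      simp only [List.length_cons]
      omega
    · have hadd : PySem.Set.add s x = s ++ [x] := by
        simp [PySem.Set.add, PySem.Set.contains_eq_listContains, hc]
      rw [hadd]
      have hrec : (¬ t.Nodup ∨ ∃ y ∈ t, y ∈ s ++ [x]) := by
        rcases h with h | ⟨y, hy, hys⟩
        · rw [List.nodup_cons] at h
          push Not at h
          by_cases hxt : x ∈ t
          · exact Or.inr ⟨x, hxt, by simp⟩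
          · exact Or.inl (h hxt)
        · rcases List.mem_cons.mp hy with rfl | hyt
          · exact absurd hys hc
          · exact Or.inr ⟨y, hyt, by simp [hys]⟩
      have := ih (s ++ [x]) hrec
      simp only [List.length_append, List.length_cons, List.length_nil] at *
      omega

theorem pvLen_ne_iff (xs : List String) :
    (xs.length ≠ (PySem.Set.ofList xs).length) ↔ ¬ xs.Nodup := by
  constructor
  · intro h hn
    exact h (by rw [PySem.Set.ofList_eq_self_of_nodup xs hn])
  · intro h
    have hlt := pvFoldlAdd_len_lt xs [] (Or.inl h)
    rw [PySem.Set.ofList_eq_foldl]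
    simp only [List.length_nil, Nat.zero_add] at hlt
    omega

-- a ≤-sorted list has an adjacent equal pair iff it has a duplicate
theorem pvAdj_iff (l : List String) (hp : l.Pairwise (· ≤ ·)) :
    ((l.zip (l.drop 1)).any (fun p => p.1 == p.2) = true) ↔ ¬ l.Nodup := by
  induction l with
  | nil => simp
  | cons a t ih =>
    cases t with
    | nil => simp
    | cons b u =>
      rw [List.pairwise_cons] at hp
      obtain ⟨ha, hp'⟩ := hp
      have hzip : ((a :: b :: u).zip ((a :: b :: u).drop 1)) = (a, b) :: ((b :: u).zip ((b :: u).drop 1)) := by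
        simp [List.zip]
      rw [hzip]
      simp only [List.any_cons, Bool.or_eq_true, beq_iff_eq]
      rw [ih hp']
      constructor
      · rintro (rfl | h)
        · simp [List.nodup_cons]
        · intro hn
          exact h (List.Nodup.of_cons hn)
      · intro hn
        rw [List.nodup_cons] at hn
        push Not at hn
        by_cases hat : a ∈ b :: u
        · left
          have h1 : a ≤ b := ha b (by simp)
          rcases List.mem_cons.mp hat with rfl | hau
          · rfl
          · have h2 : b ≤ a := (List.pairwise_cons.mp hp').1 a hau
            exact le_antisymm h1 h2
        · right
          exact hn hat

-- the two per-family duplicate flags agree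
theorem pvFlag_eq (xs : List String) (c : Bool) :
    (if xs.length ≠ (PySem.Set.ofList xs).length then false else c)
      = (if ((PySem.List.sorted xs (fun x => x) false).zip ((PySem.List.sorted xs (fun x => x) false).drop 1)).any (fun p => p.1 == p.2) then false else c) := by
  have hperm := PySem.List.sorted_perm xs (fun x => x) false
  have hpw : (PySem.List.sorted xs (fun x => x) false).Pairwise (· ≤ ·) :=
    PySem.List.sorted_pairwise xs (fun x => x)
  have h1 := pvLen_ne_iff xs
  have h2 := pvAdj_iff _ hpw
  rw [hperm.nodup_iff] at h2
  by_cases h : xs.Nodup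
  · have hA : ¬ (xs.length ≠ (PySem.Set.ofList xs).length) := fun hne => (h1.mp hne) h
    have hB : ¬ (((PySem.List.sorted xs (fun x => x) false).zip ((PySem.List.sorted xs (fun x => x) false).drop 1)).any (fun p => p.1 == p.2) = true) :=
      fun ha => (h2.mp ha) h
    rw [if_neg hA, if_neg hB]
  · rw [if_pos (h1.mpr h), if_pos (h2.mpr h)]

theorem pvOuter (fam_dict : List (String × List (List String))) : ∀ c : Bool,
    (fam_dict.foldl
      (fun (st : List String × Bool) fam =>
        let ids := fam.2.foldl pvStepA st.1
        let cond := if ids.length ≠ (PySem.Set.ofList ids).length then false else st.2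
        (([] : List String), cond))
      (([] : List String), c)).2
    = fam_dict.foldl
      (fun ok fam =>
        let ids := PySem.List.sorted ((fam.2.filter pvIsTag).map (fun e => e.getD 1 "")) (fun x => x) false
        if (ids.zip (ids.drop 1)).any (fun p => p.1 == p.2) then false else ok)
      c := by
  induction fam_dict with
  | nil => simp
  | cons fam t ih =>
    intro c
    simp only [List.foldl_cons]
    rw [pvIds_eq fam.2 []]
    simp only [List.nil_append]
    rw [ih]
    congr 1
    exact pvFlag_eq _ c

-- ===== VERDICT (by name: the statement is the Claim_ definition above) =====
theorem parentsNotMarriedToChildren_spec : Claim_equal_parentsNotMarriedToChildren := by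
  intro fam_dict _ _
  unfold Spec_parentsNotMarriedToChildren parentsNotMarriedToChildren parentsNotMarriedToChildren_alt
  exact pvOuter fam_dict true
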